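-- pv_equiv track=rewrite | github.com/Kundankkrishna/Python-DSA | closestminmax.py | closestminmax
-- ===== SOURCE A (Python) =====
-- def closestminmax(arr):
--     ans = len(arr)  # initializing the ans to the length of array as this will surely contain the min and max in array.
--     minm = min(arr)
--     maxi = max(arr)
--     if minm == maxi: # if min and max values are same then length of subarray containing them is 1
--         return 1
--
--     minidx = -1
--     maxidx = -1
--
--     for i in range(len(arr)):
--         if arr[i] == minm:
--             minidx = i
--             if maxidx != -1:
--                 diff = abs(maxidx - minidx) + 1
--                 ans = min(diff, ans)
--
--         if arr[i] == maxi: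
--             maxidx = i
--             if minidx != -1:
--                 diff = abs(minidx - maxidx) + 1
--                 ans = min(diff, ans)
--
--     return ans
-- ===== SOURCE B (Python) =====
-- def closestminmax(arr):
--     minm = min(arr)
--     maxi = max(arr)
--     if minm == maxi:
--         return 1
--     mins = [i for i, x in enumerate(arr) if x == minm]
--     maxs = [i for i, x in enumerate(arr) if x == maxi]
--     ans = len(arr)
--     i = 0
--     j = 0
--     while i < len(mins) and j < len(maxs):
--         ans = min(ans, abs(mins[i] - maxs[j]) + 1)
--         if mins[i] < maxs[j]:
--             i += 1
--         else:
--             j += 1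
--     return ans
-- ===== Notes on version B (the rewrite author's own statement) =====
-- stated objective: alternative
-- what changed: Instead of A's single scan that tracks the most recent min/max index, B collects the sorted lists of min-positions and max-positions and runs a classic two-pointer merge over them, taking the minimum window at each step.
import Mathlib
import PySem

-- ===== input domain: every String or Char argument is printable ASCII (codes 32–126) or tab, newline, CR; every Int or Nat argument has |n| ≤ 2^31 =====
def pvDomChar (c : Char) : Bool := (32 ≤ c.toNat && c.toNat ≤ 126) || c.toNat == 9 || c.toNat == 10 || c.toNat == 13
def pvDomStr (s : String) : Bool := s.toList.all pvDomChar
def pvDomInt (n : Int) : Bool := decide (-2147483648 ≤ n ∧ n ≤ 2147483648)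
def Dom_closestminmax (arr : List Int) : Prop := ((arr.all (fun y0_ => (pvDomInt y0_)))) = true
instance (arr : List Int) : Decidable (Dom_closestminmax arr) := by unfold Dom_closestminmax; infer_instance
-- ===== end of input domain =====

-- B replaces A's last-seen-index scan by a two-pointer merge over the sorted lists of
-- min-positions and max-positions (same asymptotic cost, different traversal shape).

-- ===== PORT A =====
-- one iteration of A's for-loop body, state (minidx, maxidx, ans), x = arr[i]
def pvStepA (minm maxi x i : Int) (st : Int × Int × Int) : Int × Int × Int :=
  let s1 : Int × Int :=
    if x = minm then
      (i, if st.2.1 ≠ -1 then min (|st.2.1 - i| + 1) st.2.2 else st.2.2)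
    else (st.1, st.2.2)
  let s2 : Int × Int :=
    if x = maxi then
      (i, if s1.1 ≠ -1 then min (|s1.1 - i| + 1) s1.2 else s1.2)
    else (st.2.1, s1.2)
  (s1.1, s2.1, s2.2)

def pvLoopA (minm maxi : Int) : List Int → Int → (Int × Int × Int) → (Int × Int × Int)
  | [], _, st => st
  | x :: rest, i, st => pvLoopA minm maxi rest (i + 1) (pvStepA minm maxi x i st)

def closestminmax (arr : List Int) : Int :=
  match PySem.List.min? arr (fun x => x), PySem.List.max? arr (fun x => x) with
  | some minm, some maxi =>
    if minm = maxi then 1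
    else (pvLoopA minm maxi arr 0 (-1, -1, (arr.length : Int))).2.2
  | _, _ => 0   -- unreachable under Pre_: min([]) raises ValueError in Python

-- ===== PORT B =====
-- [i for i, x in enumerate(arr) if x == v]
def pvPositions (arr : List Int) (v : Int) : List Int :=
  ((PySem.List.enumerate arr 0).filter (fun p => p.2 = v)).map (fun p => p.1)

-- the while-loop of B: the two index pointers are the remaining suffixes of mins/maxs
def pvLoopB : List Int → List Int → Int → Int
  | p :: ps, q :: qs, ans =>
    let a := min ans (|p - q| + 1)
    if p < q then pvLoopB ps (q :: qs) a else pvLoopB (p :: ps) qs a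
  | _, _, ans => ans
termination_by ps qs _ => ps.length + qs.length

def closestminmax_alt (arr : List Int) : Int :=
  match PySem.List.min? arr (fun x => x) with
  | none => 0   -- unreachable under Pre_: min([]) raises ValueError in Python
  | some minm =>
    match PySem.List.max? arr (fun x => x) with
    | none => 0   -- unreachable under Pre_
    | some maxi =>
      if minm = maxi then 1
      else pvLoopB (pvPositions arr minm) (pvPositions arr maxi) (arr.length : Int)

-- ===== PRECONDITION & SPEC =====
-- Pre_ excludes only the empty list, on which Python's min(arr) raises ValueError.
def Pre_closestminmax (arr : List Int) : Prop := arr ≠ []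
instance (arr : List Int) : Decidable (Pre_closestminmax arr) := by unfold Pre_closestminmax; infer_instance
def pvWitness_closestminmax : List Int := [1, 0, 1, 2]

def Spec_closestminmax (arr : List Int) (out : Int) : Prop := out = closestminmax_alt arr
instance (arr : List Int) (out : Int) : Decidable (Spec_closestminmax arr out) := by unfold Spec_closestminmax; infer_instance

-- ===== CLAIM (what is proved, stated in full; the proofs are below) =====
def Claim_equal_closestminmax : Prop := ∀ (arr : List Int), Dom_closestminmax arr → Pre_closestminmax arr → Spec_closestminmax arr (closestminmax arr)

-- ===== LEMMAS AND PROOFS =====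

-- "p is a position of value v in arr strictly below index i"
def PB (arr : List Int) (v : Int) (i : Nat) (p : Int) : Prop :=
  ∃ k : Nat, k < i ∧ k < arr.length ∧ p = (k : Int) ∧ arr.getD k 0 = v

-- the common characterization: a = len(arr) capped by the min of |p-q|+1 over all pairs
def IsBest (arr : List Int) (m M a : Int) : Prop :=
  a ≤ (arr.length : Int)
  ∧ (∀ p ∈ pvPositions arr m, ∀ q ∈ pvPositions arr M, a ≤ |p - q| + 1)
  ∧ (a = (arr.length : Int) ∨ ∃ p ∈ pvPositions arr m, ∃ q ∈ pvPositions arr M, a = |p - q| + 1)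

theorem isBest_unique {arr : List Int} {m M a b : Int}
    (ha : IsBest arr m M a) (hb : IsBest arr m M b) : a = b := by
  obtain ⟨ha1, ha2, ha3⟩ := ha
  obtain ⟨hb1, hb2, hb3⟩ := hb
  apply le_antisymm
  · rcases hb3 with h | ⟨p, hp, q, hq, h⟩
    · omega
    · have := ha2 p hp q hq; omega
  · rcases ha3 with h | ⟨p, hp, q, hq, h⟩
    · omega
    · have := hb2 p hp q hq; omega

theorem mem_pvPositions {arr : List Int} {v p : Int} :
    p ∈ pvPositions arr v ↔ ∃ k : Nat, k < arr.length ∧ p = (k : Int) ∧ arr.getD k 0 = v := by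
  simp only [pvPositions, List.mem_map, List.mem_filter]
  constructor
  · rintro ⟨⟨pi, px⟩, ⟨hmem, hx⟩, rfl⟩
    rw [PySem.List.mem_enumerate_iff] at hmem
    obtain ⟨k, hk, hpair⟩ := hmem
    refine ⟨k, hk, ?_, ?_⟩
    · simpa using congrArg Prod.fst hpair
    · have h2 : px = arr[k] := by simpa using congrArg Prod.snd hpair
      have := List.getD_eq_getElem arr 0 hk
      simp only [decide_eq_true_eq] at hx
      omega
  · rintro ⟨k, hk, rfl, hv⟩
    refine ⟨((k : Int), arr[k]), ⟨?_, ?_⟩, rfl⟩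
    · rw [PySem.List.mem_enumerate_iff]; exact ⟨k, hk, by simp⟩
    · have := List.getD_eq_getElem arr 0 hk
      simp only [decide_eq_true_eq]; omega

theorem sorted_pvPositions (arr : List Int) (v : Int) :
    (pvPositions arr v).Pairwise (· < ·) := by
  apply List.Pairwise.map
  case H => exact fun a b (h : a.1 < b.1) => h
  exact ((PySem.List.pairwise_lt_enumerate arr 0).sublist (List.filter_sublist))

theorem mem_pvPositions_PB {arr : List Int} {v p : Int} :
    p ∈ pvPositions arr v ↔ PB arr v arr.length p := by
  rw [mem_pvPositions]; unfold PB
  constructor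
  · rintro ⟨k, h1, h2, h3⟩; exact ⟨k, h1, h1, h2, h3⟩
  · rintro ⟨k, _, h1, h2, h3⟩; exact ⟨k, h1, h2, h3⟩

-- ---------- B side ----------

theorem pvLoopB_nil_left (qs : List Int) (a : Int) : pvLoopB [] qs a = a := by
  rw [pvLoopB.eq_def]

theorem pvLoopB_nil_right (ps : List Int) (a : Int) : pvLoopB ps [] a = a := by
  cases ps <;> rw [pvLoopB.eq_def]

theorem pvLoopB_le (ps qs : List Int) (a : Int) : pvLoopB ps qs a ≤ a := by
  induction ps, qs, a using pvLoopB.induct with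
  | case1 p ps q qs ans a hlt ih =>
    rw [pvLoopB, if_pos hlt]
    exact le_trans ih (min_le_left _ _)
  | case2 p ps q qs ans a hlt ih =>
    rw [pvLoopB, if_neg hlt]
    exact le_trans ih (min_le_left _ _)
  | case3 ps qs a h =>
    cases ps with
    | nil => rw [pvLoopB_nil_left]
    | cons p ps =>
      cases qs with
      | nil => rw [pvLoopB_nil_right]
      | cons q qs => exact (h p ps q qs rfl rfl).elim

theorem pvLoopB_pairs (ps qs : List Int) (a : Int)
    (hps : ps.Pairwise (· < ·)) (hqs : qs.Pairwise (· < ·)) :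
    ∀ p ∈ ps, ∀ q ∈ qs, pvLoopB ps qs a ≤ |p - q| + 1 := by
  induction ps, qs, a using pvLoopB.induct with
  | case1 p ps q qs ans a hlt ih =>
    intro p' hp' q' hq'
    rw [pvLoopB, if_pos hlt]
    rcases List.mem_cons.mp hp' with rfl | hp'
    · have hq'q : q ≤ q' := by
        rcases List.mem_cons.mp hq' with rfl | h
        · exact le_rfl
        · exact le_of_lt ((List.pairwise_cons.mp hqs).1 _ h)
      have hle : pvLoopB ps (q :: qs) (min ans (|p' - q| + 1)) ≤ min ans (|p' - q| + 1) :=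
        pvLoopB_le _ _ _
      have e1 : |p' - q| = q - p' := by rw [abs_of_nonpos (by omega)]; ring
      have e2 : |p' - q'| = q' - p' := by rw [abs_of_nonpos (by omega)]; ring
      omega
    · exact ih hps.of_cons hqs p' hp' q' hq'
  | case2 p ps q qs ans a hlt ih =>
    intro p' hp' q' hq'
    rw [pvLoopB, if_neg hlt]
    rcases List.mem_cons.mp hq' with rfl | hq'
    · have hp'p : p ≤ p' := by
        rcases List.mem_cons.mp hp' with rfl | h
        · exact le_rfl
        · exact le_of_lt ((List.pairwise_cons.mp hps).1 _ h)
      have hle : pvLoopB (p :: ps) qs (min ans (|p - q'| + 1)) ≤ min ans (|p - q'| + 1) :=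
        pvLoopB_le _ _ _
      have e1 : |p - q'| = p - q' := abs_of_nonneg (by omega)
      have e2 : |p' - q'| = p' - q' := abs_of_nonneg (by omega)
      omega
    · exact ih hps hqs.of_cons p' hp' q' hq'
  | case3 ps qs a h =>
    intro p' hp' q' hq'
    cases ps with
    | nil => simp at hp'
    | cons p ps =>
      cases qs with
      | nil => simp at hq'
      | cons q qs => exact (h p ps q qs rfl rfl).elim

theorem pvLoopB_wit (ps qs : List Int) (a : Int) :
    pvLoopB ps qs a = a ∨ ∃ p ∈ ps, ∃ q ∈ qs, pvLoopB ps qs a = |p - q| + 1 := by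
  induction ps, qs, a using pvLoopB.induct with
  | case1 p ps q qs ans a hlt ih =>
    rw [pvLoopB, if_pos hlt]
    rcases ih with h | ⟨p', hp', q', hq', h⟩
    · rcases le_total ans (|p - q| + 1) with hm | hm
      · left; rw [h]; show min ans (|p - q| + 1) = ans; exact min_eq_left hm
      · right
        exact ⟨p, List.mem_cons_self .., q, List.mem_cons_self ..,
          by rw [h]; show min ans (|p - q| + 1) = |p - q| + 1; exact min_eq_right hm⟩
    · right; exact ⟨p', List.mem_cons_of_mem _ hp', q', hq', h⟩
  | case2 p ps q qs ans a hlt ih =>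
    rw [pvLoopB, if_neg hlt]
    rcases ih with h | ⟨p', hp', q', hq', h⟩
    · rcases le_total ans (|p - q| + 1) with hm | hm
      · left; rw [h]; show min ans (|p - q| + 1) = ans; exact min_eq_left hm
      · right
        exact ⟨p, List.mem_cons_self .., q, List.mem_cons_self ..,
          by rw [h]; show min ans (|p - q| + 1) = |p - q| + 1; exact min_eq_right hm⟩
    · right; exact ⟨p', hp', q', List.mem_cons_of_mem _ hq', h⟩
  | case3 ps qs a h =>
    cases ps with
    | nil => left; rw [pvLoopB_nil_left]
    | cons p ps =>
      cases qs with
      | nil => left; rw [pvLoopB_nil_right]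
      | cons q qs => exact (h p ps q qs rfl rfl).elim

theorem loopB_isBest (arr : List Int) (m M : Int) :
    IsBest arr m M (pvLoopB (pvPositions arr m) (pvPositions arr M) (arr.length : Int)) := by
  refine ⟨pvLoopB_le _ _ _, ?_, ?_⟩
  · exact pvLoopB_pairs _ _ _ (sorted_pvPositions arr m) (sorted_pvPositions arr M)
  · exact pvLoopB_wit _ _ _

-- ---------- A side ----------

-- "idx is the last position of v below i, or -1 and there is none"
def LastOf (arr : List Int) (v : Int) (i : Nat) (idx : Int) : Prop :=
  (idx = -1 ∧ ∀ p, ¬ PB arr v i p) ∨ (PB arr v i idx ∧ ∀ p, PB arr v i p → p ≤ idx)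

def InvA (arr : List Int) (m M : Int) (i : Nat) (st : Int × Int × Int) : Prop :=
  LastOf arr m i st.1 ∧ LastOf arr M i st.2.1
  ∧ st.2.2 ≤ (arr.length : Int)
  ∧ (∀ p q, PB arr m i p → PB arr M i q → st.2.2 ≤ |p - q| + 1)
  ∧ (st.2.2 = (arr.length : Int) ∨ ∃ p q, PB arr m arr.length p ∧ PB arr M arr.length q ∧ st.2.2 = |p - q| + 1)

theorem PB_succ {arr : List Int} {v : Int} {i : Nat} {p : Int} (hi : i < arr.length) :
    PB arr v (i + 1) p ↔ PB arr v i p ∨ (p = (i : Int) ∧ arr.getD i 0 = v) := by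
  unfold PB
  constructor
  · rintro ⟨k, h1, h2, h3, h4⟩
    rcases Nat.lt_succ_iff_lt_or_eq.mp h1 with h | rfl
    · exact Or.inl ⟨k, h, h2, h3, h4⟩
    · exact Or.inr ⟨h3, h4⟩
  · rintro (⟨k, h1, h2, h3, h4⟩ | ⟨h1, h2⟩)
    · exact ⟨k, by omega, h2, h3, h4⟩
    · exact ⟨i, by omega, hi, h1, h2⟩

theorem PB_stable {arr : List Int} {v : Int} {i : Nat} (h : arr.length ≤ i) (p : Int) :
    PB arr v i p ↔ PB arr v arr.length p := by
  unfold PB; constructor <;> rintro ⟨k, h1, h2, h3, h4⟩ <;> exact ⟨k, by omega, h2, h3, h4⟩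

theorem PB_to_len {arr : List Int} {v : Int} {i : Nat} {p : Int} (h : PB arr v i p) :
    PB arr v arr.length p := by
  obtain ⟨k, _, h2, h3, h4⟩ := h; exact ⟨k, h2, h2, h3, h4⟩

theorem PB_nonneg {arr : List Int} {v : Int} {i : Nat} {p : Int} (h : PB arr v i p) : 0 ≤ p := by
  obtain ⟨k, _, _, rfl, _⟩ := h; omega

theorem PB_lt {arr : List Int} {v : Int} {i : Nat} {p : Int} (h : PB arr v i p) : p < (i : Int) := by
  obtain ⟨k, h1, _, rfl, _⟩ := h; omega

theorem PB_unchanged {arr : List Int} {v x : Int} {i : Nat} (hi : i < arr.length)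
    (hx : arr.getD i 0 = x) (hv : ¬ x = v) (p : Int) :
    PB arr v (i + 1) p ↔ PB arr v i p := by
  rw [PB_succ hi]
  constructor
  · rintro (h | ⟨_, h⟩)
    · exact h
    · exact absurd (by omega : x = v) hv
  · exact Or.inl

theorem lastOf_unchanged {arr : List Int} {v x idx : Int} {i : Nat} (hi : i < arr.length)
    (hx : arr.getD i 0 = x) (hv : ¬ x = v) (h : LastOf arr v i idx) :
    LastOf arr v (i + 1) idx := by
  unfold LastOf at h ⊢
  rcases h with ⟨e, hn⟩ | ⟨hm, hl⟩
  · exact Or.inl ⟨e, fun p hp => hn p ((PB_unchanged hi hx hv p).mp hp)⟩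
  · exact Or.inr ⟨(PB_unchanged hi hx hv _).mpr hm, fun p hp => hl p ((PB_unchanged hi hx hv p).mp hp)⟩

theorem lastOf_self {arr : List Int} {v : Int} {i : Nat} (hi : i < arr.length)
    (hx : arr.getD i 0 = v) : LastOf arr v (i + 1) (i : Int) := by
  right
  constructor
  · exact (PB_succ hi).mpr (Or.inr ⟨rfl, hx⟩)
  · intro p hp
    rcases (PB_succ hi).mp hp with h | ⟨rfl, _⟩
    · have := PB_lt h; omega
    · omega

theorem loopA_inv (arr : List Int) (m M : Int) (hmM : m ≠ M) :
    ∀ (s : List Int) (i : Nat) (st : Int × Int × Int), arr.drop i = s → InvA arr m M i st →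
      InvA arr m M arr.length (pvLoopA m M s (i : Int) st) := by
  intro s
  induction s with
  | nil =>
    intro i st hdrop hinv
    have hlen : arr.length ≤ i := by
      by_contra h
      have := List.drop_eq_nil_iff.mp hdrop
      omega
    rw [pvLoopA]
    obtain ⟨h1, h2, h3, h4, h5⟩ := hinv
    refine ⟨?_, ?_, h3, ?_, h5⟩
    · unfold LastOf at h1 ⊢
      rcases h1 with ⟨e, hn⟩ | ⟨hm, hl⟩
      · exact Or.inl ⟨e, fun p hp => hn p ((PB_stable hlen p).mpr hp)⟩
      · exact Or.inr ⟨(PB_stable hlen _).mp hm, fun p hp => hl p ((PB_stable hlen p).mpr hp)⟩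
    · unfold LastOf at h2 ⊢
      rcases h2 with ⟨e, hn⟩ | ⟨hm, hl⟩
      · exact Or.inl ⟨e, fun p hp => hn p ((PB_stable hlen p).mpr hp)⟩
      · exact Or.inr ⟨(PB_stable hlen _).mp hm, fun p hp => hl p ((PB_stable hlen p).mpr hp)⟩
    · intro p q hp hq
      exact h4 p q ((PB_stable hlen p).mpr hp) ((PB_stable hlen q).mpr hq)
  | cons x s ih =>
    intro i st hdrop hinv
    obtain ⟨minidx, maxidx, ans⟩ := st
    dsimp only [InvA] at hinv
    have hi : i < arr.length := by
      by_contra h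
      rw [List.drop_eq_nil_of_le (by omega)] at hdrop
      simp at hdrop
    have hx : arr.getD i 0 = x := by
      have h0 : arr[i]? = some x := by
        rw [show i = i + 0 from rfl, ← List.getElem?_drop, hdrop]
        rfl
      rw [List.getD_eq_getElem?_getD, h0]
      rfl
    have hdrop' : arr.drop (i + 1) = s := by
      have h' : arr.drop (i + 1) = (arr.drop i).tail := by rw [List.tail_drop]
      rw [h', hdrop]
      rfl
    rw [pvLoopA]
    obtain ⟨h1, h2, h3, h4, h5⟩ := hinv
    have hcast : ((i : Int) + 1) = ((i + 1 : Nat) : Int) := by push_cast; ring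
    rw [hcast]
    apply ih (i + 1) _ hdrop'
    by_cases hxm : x = m
    · -- arr[i] is the min (and not the max, since m ≠ M)
      have hxM : ¬ x = M := fun h => hmM (hxm ▸ h)
      by_cases hma : maxidx = -1
      · -- no max seen yet: only minidx is updated
        have hstep : pvStepA m M x (i : Int) (minidx, maxidx, ans) = ((i : Int), maxidx, ans) := by
          simp [pvStepA, hxm, hmM, hma]
        rw [hstep]; dsimp only [InvA]
        have h2' : ∀ q, ¬ PB arr M i q := by
          rcases h2 with ⟨_, hn⟩ | ⟨hm', _⟩
          · exact hn
          · exact absurd hma (by have := PB_nonneg hm'; omega)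
        refine ⟨lastOf_self hi (by omega), lastOf_unchanged hi hx hxM h2, h3, ?_, h5⟩
        intro p q hp hq
        exact absurd ((PB_unchanged hi hx hxM q).mp hq) (h2' q)
      · -- a max was seen: ans is updated with the last max index
        have hstep : pvStepA m M x (i : Int) (minidx, maxidx, ans) =
            ((i : Int), maxidx, min (|maxidx - (i : Int)| + 1) ans) := by
          simp [pvStepA, hxm, hmM, hma]
        rw [hstep]; dsimp only [InvA]
        obtain ⟨hm', hl⟩ : PB arr M i maxidx ∧ ∀ q, PB arr M i q → q ≤ maxidx := by
          rcases h2 with ⟨e, _⟩ | h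
          · exact absurd e hma
          · exact h
        have hmlt : maxidx < (i : Int) := PB_lt hm'
        have hmnn : 0 ≤ maxidx := PB_nonneg hm'
        have e1 : |maxidx - (i : Int)| = (i : Int) - maxidx := by
          rw [abs_of_nonpos (by omega)]; ring
        refine ⟨lastOf_self hi (by omega), lastOf_unchanged hi hx hxM h2, ?_, ?_, ?_⟩
        · exact le_trans (min_le_right _ _) h3
        · intro p q hp hq
          have hq' : PB arr M i q := (PB_unchanged hi hx hxM q).mp hq
          rcases (PB_succ hi).mp hp with hp' | ⟨rfl, _⟩
          · exact le_trans (min_le_right _ _) (h4 p q hp' hq')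
          · have hqle : q ≤ maxidx := hl q hq'
            have hqnn : 0 ≤ q := PB_nonneg hq'
            have e2 : |(i : Int) - q| = (i : Int) - q := abs_of_nonneg (by omega)
            omega
        · rcases le_total (|maxidx - (i : Int)| + 1) ans with hm2 | hm2
          · right
            refine ⟨(i : Int), maxidx, ⟨i, hi, hi, rfl, by omega⟩, PB_to_len hm', ?_⟩
            rw [min_eq_left hm2, abs_sub_comm]
          · rw [min_eq_right hm2]; exact h5
    · by_cases hxM : x = M
      · -- arr[i] is the max (and not the min)
        by_cases hmi : minidx = -1
        · have hstep : pvStepA m M x (i : Int) (minidx, maxidx, ans) = (minidx, (i : Int), ans) := by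
            simp [pvStepA, hxM, hmi, Ne.symm hmM]
          rw [hstep]; dsimp only [InvA]
          have h1' : ∀ p, ¬ PB arr m i p := by
            rcases h1 with ⟨_, hn⟩ | ⟨hm', _⟩
            · exact hn
            · exact absurd hmi (by have := PB_nonneg hm'; omega)
          refine ⟨lastOf_unchanged hi hx hxm h1, lastOf_self hi (by omega), h3, ?_, h5⟩
          intro p q hp hq
          exact absurd ((PB_unchanged hi hx hxm p).mp hp) (h1' p)
        · have hstep : pvStepA m M x (i : Int) (minidx, maxidx, ans) =
              (minidx, (i : Int), min (|minidx - (i : Int)| + 1) ans) := by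
            simp [pvStepA, hxM, hmi, Ne.symm hmM]
          rw [hstep]; dsimp only [InvA]
          obtain ⟨hm', hl⟩ : PB arr m i minidx ∧ ∀ p, PB arr m i p → p ≤ minidx := by
            rcases h1 with ⟨e, _⟩ | h
            · exact absurd e hmi
            · exact h
          have hmlt : minidx < (i : Int) := PB_lt hm'
          have hmnn : 0 ≤ minidx := PB_nonneg hm'
          have e1 : |minidx - (i : Int)| = (i : Int) - minidx := by
            rw [abs_of_nonpos (by omega)]; ring
          refine ⟨lastOf_unchanged hi hx hxm h1, lastOf_self hi (by omega), ?_, ?_, ?_⟩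
          · exact le_trans (min_le_right _ _) h3
          · intro p q hp hq
            have hp' : PB arr m i p := (PB_unchanged hi hx hxm p).mp hp
            rcases (PB_succ hi).mp hq with hq' | ⟨rfl, _⟩
            · exact le_trans (min_le_right _ _) (h4 p q hp' hq')
            · have hple : p ≤ minidx := hl p hp'
              have hpnn : 0 ≤ p := PB_nonneg hp'
              have e2 : |p - (i : Int)| = (i : Int) - p := by
                rw [abs_of_nonpos (by omega)]; ring
              omega
          · rcases le_total (|minidx - (i : Int)| + 1) ans with hm2 | hm2
            · right
              refine ⟨minidx, (i : Int), PB_to_len hm', ⟨i, hi, hi, rfl, by omega⟩, ?_⟩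
              rw [min_eq_left hm2]
            · rw [min_eq_right hm2]; exact h5
      · -- arr[i] is neither the min nor the max
        have hstep : pvStepA m M x (i : Int) (minidx, maxidx, ans) = (minidx, maxidx, ans) := by
          simp [pvStepA, hxm, hxM]
        rw [hstep]; dsimp only [InvA]
        refine ⟨lastOf_unchanged hi hx hxm h1, lastOf_unchanged hi hx hxM h2, h3, ?_, h5⟩
        intro p q hp hq
        exact h4 p q ((PB_unchanged hi hx hxm p).mp hp) ((PB_unchanged hi hx hxM q).mp hq)

theorem loopA_isBest (arr : List Int) (m M : Int) (hmM : m ≠ M) :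
    IsBest arr m M (pvLoopA m M arr 0 (-1, -1, (arr.length : Int))).2.2 := by
  have h0 : InvA arr m M 0 (-1, -1, (arr.length : Int)) := by
    refine ⟨Or.inl ⟨rfl, ?_⟩, Or.inl ⟨rfl, ?_⟩, le_refl _, ?_, Or.inl rfl⟩
    · rintro p ⟨k, hk, _⟩; omega
    · rintro p ⟨k, hk, _⟩; omega
    · rintro p q ⟨k, hk, _⟩; omega
  have hfin := loopA_inv arr m M hmM arr 0 (-1, -1, (arr.length : Int)) (by simp) h0
  obtain ⟨_, _, h3, h4, h5⟩ := hfin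
  refine ⟨h3, ?_, ?_⟩
  · intro p hp q hq
    exact h4 p q (mem_pvPositions_PB.mp hp) (mem_pvPositions_PB.mp hq)
  · rcases h5 with h | ⟨p, q, hp, hq, h⟩
    · exact Or.inl h
    · exact Or.inr ⟨p, mem_pvPositions_PB.mpr hp, q, mem_pvPositions_PB.mpr hq, h⟩

-- ===== VERDICT (by name: the statement is the Claim_ definition above) =====
theorem closestminmax_spec : Claim_equal_closestminmax := by
  intro arr _ hpre
  unfold Spec_closestminmax closestminmax closestminmax_alt
  obtain ⟨m, hm⟩ : ∃ m, PySem.List.min? arr (fun x => x) = some m := by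
    cases h : PySem.List.min? arr (fun x => x) with
    | none => exact absurd ((PySem.List.min?_eq_none_iff arr (fun x => x)).mp h) hpre
    | some m => exact ⟨m, rfl⟩
  obtain ⟨M, hM⟩ : ∃ M, PySem.List.max? arr (fun x => x) = some M := by
    cases h : PySem.List.max? arr (fun x => x) with
    | none => exact absurd ((PySem.List.max?_eq_none_iff arr (fun x => x)).mp h) hpre
    | some M => exact ⟨M, rfl⟩
  rw [hm, hM]
  by_cases hmM : m = M
  · simp [hmM]
  · simp only [if_neg hmM]
    exact isBest_unique (loopA_isBest arr m M hmM) (loopB_isBest arr m M)
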